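-- pv_equiv track=rewrite | github.com/KimJinSuAI/CodingTestPractice | 프로그래머스/Level4/지형 편집(실패, 이분탐색은 목표값을 알 수 있어야 한다.).py | solution
-- ===== SOURCE A (Python) =====
-- def solution(land, P, Q):
--     answer = -1
--     height_dict = dict()
--     for i in range(len(land)):
--         for j in range(len(land)):
--             if land[i][j] in height_dict:
--                 height_dict[land[i][j]] += 1
--             else:
--                 height_dict[land[i][j]] = 1
--     height_list = sorted(list(height_dict.keys()))
--     minidx = 0
--     maxidx = len(height_list)-1
--     money = 0
--     while minidx != maxidx:
--         low_num = height_dict[height_list[minidx]]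
--         high_num = height_dict[height_list[maxidx]]
--         if P*low_num < Q*high_num:
--             money += P*low_num*(height_list[minidx+1]-height_list[minidx])
--             minidx += 1
--             height_dict[height_list[minidx]] += low_num
--         else:
--             money += Q*high_num*(height_list[maxidx]-height_list[maxidx-1])
--             maxidx -= 1
--             height_dict[height_list[maxidx]] += high_num
--
--     answer = money
--     return answer
-- ===== SOURCE B (Python) =====
-- def solution(land, P, Q):
--     n = len(land)
--     counts = {}
--     for i in range(n):
--         for j in range(n):
--             h = land[i][j]
--             counts[h] = counts.get(h, 0) + 1
--     heights = sorted(counts)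
--     total_cnt = 0
--     total_sum = 0
--     for t in heights:
--         total_cnt += counts[t]
--         total_sum += counts[t] * t
--     best = None
--     cnt_below = 0
--     sum_below = 0
--     for t in heights:
--         c = counts[t]
--         cnt_above = total_cnt - cnt_below - c
--         sum_above = total_sum - sum_below - c * t
--         cost = P * (cnt_below * t - sum_below) + Q * (sum_above - cnt_above * t)
--         if best is None or cost < best:
--             best = cost
--         cnt_below += c
--         sum_below += c * t
--     return best
-- ===== Notes on version B (the rewrite author's own statement) =====
-- stated objective: alternative
-- what changed: Replaces A's inward two-pointer greedy merge with mutated dict counts by a single forward prefix-sum scan that evaluates the closed-form leveling cost at each candidate target height and takes the minimum.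
-- outside the precondition, e.g. on solution([[3, 0], [1, 1]], -3, -3): A returns -15, B returns -21
import Mathlib
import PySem

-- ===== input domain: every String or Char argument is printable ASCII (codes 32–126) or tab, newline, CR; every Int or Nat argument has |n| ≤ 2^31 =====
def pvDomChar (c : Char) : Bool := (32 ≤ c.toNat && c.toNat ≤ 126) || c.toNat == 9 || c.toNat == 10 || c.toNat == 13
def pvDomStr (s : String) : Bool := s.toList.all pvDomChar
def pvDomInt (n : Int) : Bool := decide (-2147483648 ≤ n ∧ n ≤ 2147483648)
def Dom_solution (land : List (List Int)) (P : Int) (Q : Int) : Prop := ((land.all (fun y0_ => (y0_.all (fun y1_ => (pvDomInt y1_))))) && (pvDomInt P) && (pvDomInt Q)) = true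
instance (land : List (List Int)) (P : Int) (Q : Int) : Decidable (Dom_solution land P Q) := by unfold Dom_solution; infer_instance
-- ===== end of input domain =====

-- B replaces A's two-pointer greedy merge by a forward prefix-sum scan minimising the closed-form
-- leveling cost over candidate target heights ('alternative': same cost, different algorithm).

-- ===== PORT A =====
-- A's counting loop: 'if land[i][j] in height_dict: += 1 else: = 1'
def pvBuildA (land : List (List Int)) : PySem.Dict Int Int :=
  (PySem.List.pyRange 0 (land.length : Int) 1).foldl (fun d i =>
    (PySem.List.pyRange 0 (land.length : Int) 1).foldl (fun d j =>
      let v := PySem.List.pyGetD (PySem.List.pyGetD land i []) j 0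
      if d.contains v then d.insert v (d.getD v 0 + 1) else d.insert v 1) d)
    PySem.Dict.empty

-- A's while loop; fuel = maxidx - minidx, the exact number of iterations on in-domain inputs
def pvLoopA (hl : List Int) (P Q : Int) :
    Nat → PySem.Dict Int Int → Int → Int → Int → Int
  | 0, _, _, _, money => money
  | fuel + 1, d, minidx, maxidx, money =>
    if minidx = maxidx then money
    else
      let low := d.getD (PySem.List.pyGetD hl minidx 0) 0
      let high := d.getD (PySem.List.pyGetD hl maxidx 0) 0
      if P * low < Q * high then
        let money' := money + P * low * (PySem.List.pyGetD hl (minidx + 1) 0 - PySem.List.pyGetD hl minidx 0)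
        let k := PySem.List.pyGetD hl (minidx + 1) 0
        pvLoopA hl P Q fuel (d.insert k (d.getD k 0 + low)) (minidx + 1) maxidx money'
      else
        let money' := money + Q * high * (PySem.List.pyGetD hl maxidx 0 - PySem.List.pyGetD hl (maxidx - 1) 0)
        let k := PySem.List.pyGetD hl (maxidx - 1) 0
        pvLoopA hl P Q fuel (d.insert k (d.getD k 0 + high)) minidx (maxidx - 1) money'

def solution (land : List (List Int)) (P : Int) (Q : Int) : Int :=
  let height_dict := pvBuildA land
  let height_list := PySem.List.sorted height_dict.keys (fun x => x) false
  let maxidx : Int := (height_list.length : Int) - 1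
  pvLoopA height_list P Q (maxidx - 0).toNat height_dict 0 maxidx 0

-- ===== PORT B =====
-- B's counting loop: 'counts[h] = counts.get(h, 0) + 1'
def pvBuildB (land : List (List Int)) : PySem.Dict Int Int :=
  (PySem.List.pyRange 0 (land.length : Int) 1).foldl (fun d i =>
    (PySem.List.pyRange 0 (land.length : Int) 1).foldl (fun d j =>
      let h := PySem.List.pyGetD (PySem.List.pyGetD land i []) j 0
      d.insert h (d.getD h 0 + 1)) d)
    PySem.Dict.empty

def solution_alt (land : List (List Int)) (P : Int) (Q : Int) : Int :=
  let counts := pvBuildB land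
  let heights := PySem.List.sorted counts.keys (fun x => x) false
  let tots := heights.foldl (fun (s : Int × Int) t =>
      (s.1 + counts.getD t 0, s.2 + counts.getD t 0 * t)) (0, 0)
  let r := heights.foldl (fun (s : Option Int × Int × Int) t =>
      let c := counts.getD t 0
      let cntAbove := tots.1 - s.2.1 - c
      let sumAbove := tots.2 - s.2.2 - c * t
      let cost := P * (s.2.1 * t - s.2.2) + Q * (sumAbove - cntAbove * t)
      let best : Option Int := match s.1 with
        | none => some cost
        | some b => if cost < b then some cost else some b
      (best, s.2.1 + c, s.2.2 + c * t)) (none, 0, 0)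
  match r.1 with
  | some b => b
  | none => 0   -- unreachable for nonempty land (Python B returns None only there)

-- ===== PRECONDITION & SPEC =====
-- Pre_ excludes: empty land and rows shorter than len(land), on which A raises IndexError; and the
-- nonsensical both-negative-price corner (P < 0 and Q < 0), where A's greedy picks an endpoint by
-- the first marginal comparison and B returns the cost minimum — two equally defensible values for
-- an unspecified corner no caller would rely on.
def Pre_solution (land : List (List Int)) (P : Int) (Q : Int) : Prop :=
  land ≠ [] ∧ (∀ row ∈ land, land.length ≤ row.length) ∧ (0 ≤ P ∨ 0 ≤ Q)
instance (land : List (List Int)) (P : Int) (Q : Int) : Decidable (Pre_solution land P Q) := by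
  unfold Pre_solution; infer_instance

def pvWitness_solution : List (List Int) × Int × Int := ([[1, 3], [3, 2]], 2, 3)

def Spec_solution (land : List (List Int)) (P : Int) (Q : Int) (out : Int) : Prop := out = solution_alt land P Q
instance (land : List (List Int)) (P : Int) (Q : Int) (out : Int) : Decidable (Spec_solution land P Q out) := by unfold Spec_solution; infer_instance

-- ===== CLAIM (what is proved, stated in full; the proofs are below) =====
def Claim_equal_solution : Prop := ∀ (land : List (List Int)) (P : Int) (Q : Int), Dom_solution land P Q → Pre_solution land P Q → Spec_solution land P Q (solution land P Q)

-- ===== LEMMAS AND PROOFS =====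

-- the multiset of grid values both counting loops run over
def pvVals (land : List (List Int)) : List Int :=
  (PySem.List.pyRange 0 (land.length : Int) 1).flatMap (fun i =>
    (PySem.List.pyRange 0 (land.length : Int) 1).map (fun j =>
      PySem.List.pyGetD (PySem.List.pyGetD land i []) j 0))

-- abstract quantities over the sorted height list hs and count function c
def pvG (hs : List Int) (k : Nat) : Int := hs.getD k 0
def pvCntB (hs : List Int) (c : Int → Int) (k : Nat) : Int := ((hs.take k).map c).sum
def pvSumB (hs : List Int) (c : Int → Int) (k : Nat) : Int := ((hs.take k).map (fun t => c t * t)).sum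
def pvPref (hs : List Int) (c : Int → Int) (k : Nat) : Int := pvCntB hs c (k + 1)
def pvSuf (hs : List Int) (c : Int → Int) (k : Nat) : Int := pvCntB hs c hs.length - pvCntB hs c k
def pvGL (hs : List Int) (c : Int → Int) (k : Nat) : Int :=
  ((List.range k).map (fun l => pvPref hs c l * (pvG hs (l + 1) - pvG hs l))).sum
def pvGR (hs : List Int) (c : Int → Int) (k : Nat) : Int :=
  ((List.range' k (hs.length - 1 - k)).map (fun l => pvSuf hs c (l + 1) * (pvG hs (l + 1) - pvG hs l))).sum
-- the closed-form cost B evaluates at index k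
def pvCost (hs : List Int) (c : Int → Int) (P Q : Int) (k : Nat) : Int :=
  P * (pvCntB hs c k * pvG hs k - pvSumB hs c k) +
    Q * ((pvSumB hs c hs.length - pvSumB hs c k - c (pvG hs k) * pvG hs k) -
         (pvCntB hs c hs.length - pvCntB hs c k - c (pvG hs k)) * pvG hs k)
def pvF (hs : List Int) (c : Int → Int) (P Q : Int) (k : Nat) : Int :=
  P * pvGL hs c k + Q * pvGR hs c k

-- min of f over the index interval [i, j]
def pvRmin (f : Nat → Int) (i j : Nat) : Int :=
  if h : i < j then min (f i) (pvRmin f (i + 1) j) else f i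
termination_by j - i
decreasing_by omega

def pvOptMin (ob : Option Int) (x : Int) : Option Int :=
  match ob with
  | none => some x
  | some b => if x < b then some x else some b

-- pure form of A's greedy loop
def pvGreedy (hs : List Int) (c : Int → Int) (P Q : Int) : Nat → Nat → Nat → Int → Int
  | 0, _, _, money => money
  | fuel + 1, i, j, money =>
    if i = j then money
    else if P * pvPref hs c i < Q * pvSuf hs c j then
      pvGreedy hs c P Q fuel (i + 1) j (money + P * pvPref hs c i * (pvG hs (i + 1) - pvG hs i))
    else
      pvGreedy hs c P Q fuel i (j - 1) (money + Q * pvSuf hs c j * (pvG hs j - pvG hs (j - 1)))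

-- ---- basic facts ----
lemma pvG_eq (hs : List Int) (k : Nat) (hk : k < hs.length) : pvG hs k = hs[k] :=
  List.getD_eq_getElem hs 0 hk

lemma pvCntB_succ (hs : List Int) (c : Int → Int) (k : Nat) (hk : k < hs.length) :
    pvCntB hs c (k + 1) = pvCntB hs c k + c (pvG hs k) := by
  unfold pvCntB
  rw [pvG_eq hs k hk, List.map_take, List.map_take,
    List.sum_take_succ (hs.map c) k (by simpa using hk), List.getElem_map]

lemma pvSumB_succ (hs : List Int) (c : Int → Int) (k : Nat) (hk : k < hs.length) :
    pvSumB hs c (k + 1) = pvSumB hs c k + c (pvG hs k) * pvG hs k := by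
  unfold pvSumB
  rw [pvG_eq hs k hk, List.map_take, List.map_take,
    List.sum_take_succ (hs.map fun t => c t * t) k (by simpa using hk), List.getElem_map]

lemma pvCntB_stable (hs : List Int) (c : Int → Int) (k : Nat) (hk : hs.length ≤ k) :
    pvCntB hs c k = pvCntB hs c hs.length := by
  simp [pvCntB, List.take_of_length_le hk, List.take_length]

lemma pvSumB_stable (hs : List Int) (c : Int → Int) (k : Nat) (hk : hs.length ≤ k) :
    pvSumB hs c k = pvSumB hs c hs.length := by
  simp [pvSumB, List.take_of_length_le hk, List.take_length]

lemma pvG_mem (hs : List Int) (k : Nat) (hk : k < hs.length) : pvG hs k ∈ hs := by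
  rw [pvG_eq hs k hk]; exact List.getElem_mem hk

lemma pvCntB_le_succ (hs : List Int) (c : Int → Int) (hpos : ∀ t ∈ hs, 0 < c t)
    (b : Nat) : pvCntB hs c b ≤ pvCntB hs c (b + 1) := by
  rcases Nat.lt_or_ge b hs.length with hb | hb
  · have := hpos _ (pvG_mem hs b hb)
    rw [pvCntB_succ hs c b hb]; omega
  · rw [pvCntB_stable hs c b hb, pvCntB_stable hs c (b + 1) (by omega)]

lemma pvCntB_mono (hs : List Int) (c : Int → Int) (hpos : ∀ t ∈ hs, 0 < c t)
    (a b : Nat) (hab : a ≤ b) : pvCntB hs c a ≤ pvCntB hs c b := by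
  induction b, hab using Nat.le_induction with
  | base => exact le_refl _
  | succ b hab ih => exact le_trans ih (pvCntB_le_succ hs c hpos b)

lemma pvCntB_zero (hs : List Int) (c : Int → Int) : pvCntB hs c 0 = 0 := by simp [pvCntB]

lemma pvPref_pos (hs : List Int) (c : Int → Int) (hpos : ∀ t ∈ hs, 0 < c t)
    (i : Nat) (hi : i < hs.length) : 0 < pvPref hs c i := by
  have h0 : pvCntB hs c 0 ≤ pvCntB hs c i := pvCntB_mono hs c hpos 0 i (by omega)
  have := pvCntB_succ hs c i hi
  have := hpos _ (pvG_mem hs i hi)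
  unfold pvPref
  rw [pvCntB_zero] at h0
  omega

lemma pvSuf_pos (hs : List Int) (c : Int → Int) (hpos : ∀ t ∈ hs, 0 < c t)
    (j : Nat) (hj : j < hs.length) : 0 < pvSuf hs c j := by
  have h1 : pvCntB hs c (j + 1) ≤ pvCntB hs c hs.length := pvCntB_mono hs c hpos _ _ (by omega)
  have := pvCntB_succ hs c j hj
  have := hpos _ (pvG_mem hs j hj)
  unfold pvSuf; omega

lemma pvSuf_anti (hs : List Int) (c : Int → Int) (hpos : ∀ t ∈ hs, 0 < c t)
    (a b : Nat) (hab : a ≤ b) : pvSuf hs c b ≤ pvSuf hs c a := by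
  have := pvCntB_mono hs c hpos a b hab; unfold pvSuf; omega

lemma pvPref_mono (hs : List Int) (c : Int → Int) (hpos : ∀ t ∈ hs, 0 < c t)
    (a b : Nat) (hab : a ≤ b) : pvPref hs c a ≤ pvPref hs c b :=
  pvCntB_mono hs c hpos (a + 1) (b + 1) (by omega)

lemma pvGap_nonneg (hs : List Int) (hsort : hs.Pairwise (· ≤ ·))
    (k : Nat) (hk : k + 1 < hs.length) : 0 ≤ pvG hs (k + 1) - pvG hs k := by
  have h := List.pairwise_iff_getElem.mp hsort k (k + 1) (by omega) hk (by omega)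
  rw [pvG_eq hs k (by omega), pvG_eq hs (k + 1) hk]
  omega

lemma pvGL_succ (hs : List Int) (c : Int → Int) (k : Nat) :
    pvGL hs c (k + 1) = pvGL hs c k + pvPref hs c k * (pvG hs (k + 1) - pvG hs k) := by
  simp [pvGL, List.range_succ]

lemma pvGR_succ (hs : List Int) (c : Int → Int) (k : Nat) (hk : k < hs.length - 1) :
    pvGR hs c k = pvSuf hs c (k + 1) * (pvG hs (k + 1) - pvG hs k) + pvGR hs c (k + 1) := by
  unfold pvGR
  have h : hs.length - 1 - k = (hs.length - 1 - (k + 1)) + 1 := by omega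
  rw [h, List.range'_succ]
  simp

lemma pvGR_last (hs : List Int) (c : Int → Int) (k : Nat) (hk : hs.length - 1 ≤ k) :
    pvGR hs c k = 0 := by
  unfold pvGR
  have h : hs.length - 1 - k = 0 := by omega
  simp [h]

lemma pvGL_eq (hs : List Int) (c : Int → Int) (k : Nat) (hk : k < hs.length) :
    pvGL hs c k = pvCntB hs c k * pvG hs k - pvSumB hs c k := by
  induction k with
  | zero => simp [pvGL, pvCntB_zero, pvSumB]
  | succ k ih =>
    have hk' : k < hs.length := by omega
    rw [pvGL_succ]
    rw [ih hk']
    show _ + pvCntB hs c (k + 1) * _ = _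
    rw [pvCntB_succ hs c k hk', pvSumB_succ hs c k hk']
    ring

lemma pvGR_eq (hs : List Int) (c : Int → Int) (k : Nat) (hk : k < hs.length) :
    pvGR hs c k = (pvSumB hs c hs.length - pvSumB hs c k - c (pvG hs k) * pvG hs k) -
      (pvCntB hs c hs.length - pvCntB hs c k - c (pvG hs k)) * pvG hs k := by
  have H : ∀ m, ∀ k, k < hs.length → hs.length - 1 - k ≤ m →
      pvGR hs c k = (pvSumB hs c hs.length - pvSumB hs c k - c (pvG hs k) * pvG hs k) -
        (pvCntB hs c hs.length - pvCntB hs c k - c (pvG hs k)) * pvG hs k := by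
    intro m
    induction m with
    | zero =>
      intro k hk hm
      rw [pvGR_last hs c k (by omega)]
      have h1 := pvCntB_succ hs c k hk
      have h2 := pvSumB_succ hs c k hk
      have h3 : k + 1 = hs.length := by omega
      rw [h3] at h1 h2
      linear_combination (-1 : Int) * h2 + pvG hs k * h1
    | succ m ih =>
      intro k hk hm
      rcases Nat.lt_or_ge k (hs.length - 1) with hlt | hge
      · have hk1 : k + 1 < hs.length := by omega
        rw [pvGR_succ hs c k hlt, ih (k + 1) hk1 (by omega)]
        have h1 := pvCntB_succ hs c k hk
        have h2 := pvSumB_succ hs c k hk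
        unfold pvSuf
        linear_combination pvG hs k * h1 - h2
      · rw [pvGR_last hs c k hge]
        have h1 := pvCntB_succ hs c k hk
        have h2 := pvSumB_succ hs c k hk
        have h3 : k + 1 = hs.length := by omega
        rw [h3] at h1 h2
        linear_combination (-1 : Int) * h2 + pvG hs k * h1
  exact H (hs.length - 1 - k) k hk (le_refl _)

lemma pvF_eq_cost (hs : List Int) (c : Int → Int) (P Q : Int) (k : Nat) (hk : k < hs.length) :
    pvF hs c P Q k = pvCost hs c P Q k := by
  unfold pvF pvCost
  rw [pvGL_eq hs c k hk, pvGR_eq hs c k hk]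

-- ---- pvRmin facts ----
lemma pvRmin_self (f : Nat → Int) (i : Nat) : pvRmin f i i = f i := by
  unfold pvRmin; simp

lemma pvRmin_rec_left (f : Nat → Int) (i j : Nat) (h : i < j) :
    pvRmin f i j = min (f i) (pvRmin f (i + 1) j) := by
  rw [pvRmin]; simp [h]

lemma pvRmin_le_left (f : Nat → Int) (i j : Nat) : pvRmin f i j ≤ f i := by
  rcases Nat.lt_or_ge i j with h | h
  · rw [pvRmin_rec_left f i j h]; exact min_le_left _ _
  · unfold pvRmin; simp [Nat.not_lt.mpr h]

lemma pvRmin_le_right (f : Nat → Int) (i j : Nat) (hij : i ≤ j) : pvRmin f i j ≤ f j := by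
  have H : ∀ m, ∀ i, i ≤ j → j - i ≤ m → pvRmin f i j ≤ f j := by
    intro m
    induction m with
    | zero =>
      intro i h1 h2
      have : i = j := by omega
      subst this; rw [pvRmin_self]
    | succ m ih =>
      intro i h1 h2
      rcases Nat.eq_or_lt_of_le h1 with rfl | h
      · rw [pvRmin_self]
      · rw [pvRmin_rec_left f i j h]
        have := ih (i + 1) (by omega) (by omega)
        exact le_trans (min_le_right _ _) this
  exact H (j - i) i hij (le_refl _)

lemma pvRmin_rec_right (f : Nat → Int) (i j : Nat) (h : i < j) :
    pvRmin f i j = min (pvRmin f i (j - 1)) (f j) := by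
  have H : ∀ m, ∀ i, i < j → j - i ≤ m → pvRmin f i j = min (pvRmin f i (j - 1)) (f j) := by
    intro m
    induction m with
    | zero => intro i h1 h2; omega
    | succ m ih =>
      intro i h1 h2
      rcases Nat.lt_or_ge i (j - 1) with h3 | h3
      · rw [pvRmin_rec_left f i j h1, ih (i + 1) (by omega) (by omega),
          pvRmin_rec_left f i (j - 1) h3, min_assoc]
      · have : i = j - 1 := by omega
        subst this
        rw [pvRmin_rec_left f (j - 1) j h1, pvRmin_self]
        have hj : (j - 1) + 1 = j := by omega
        rw [hj, pvRmin_self, min_comm]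
  exact H (j - i) i h (le_refl _)

lemma pvRmin_drop_left (f : Nat → Int) (i j : Nat) (h : i < j) (hfe : f (i + 1) ≤ f i) :
    pvRmin f i j = pvRmin f (i + 1) j := by
  rw [pvRmin_rec_left f i j h]
  have h1 : pvRmin f (i + 1) j ≤ f (i + 1) := pvRmin_le_left f (i + 1) j
  exact min_eq_right (by omega)

lemma pvRmin_drop_right (f : Nat → Int) (i j : Nat) (h : i < j) (hfe : f (j - 1) ≤ f j) :
    pvRmin f i j = pvRmin f i (j - 1) := by
  rw [pvRmin_rec_right f i j h]
  have h1 : pvRmin f i (j - 1) ≤ f (j - 1) := pvRmin_le_right f i (j - 1) (by omega)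
  exact min_eq_left (by omega)

lemma pvRmin_congr (f g : Nat → Int) (i j : Nat) (hij : i ≤ j)
    (hc : ∀ k, i ≤ k → k ≤ j → f k = g k) : pvRmin f i j = pvRmin g i j := by
  have H : ∀ m, ∀ i, i ≤ j → (∀ k, i ≤ k → k ≤ j → f k = g k) → j - i ≤ m →
      pvRmin f i j = pvRmin g i j := by
    intro m
    induction m with
    | zero =>
      intro i h0 hc hm
      have : i = j := by omega
      subst this
      rw [pvRmin_self, pvRmin_self]
      exact hc i (le_refl _) (le_refl _)
    | succ m ih =>
      intro i h0 hc hm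
      rcases Nat.eq_or_lt_of_le h0 with rfl | h
      · rw [pvRmin_self, pvRmin_self]; exact hc i (le_refl _) (le_refl _)
      · rw [pvRmin_rec_left f i j h, pvRmin_rec_left g i j h,
          hc i (le_refl _) (by omega), ih (i + 1) (by omega) (fun k h1 h2 => hc k (by omega) h2) (by omega)]
  exact H (j - i) i hij hc (le_refl _)

-- ---- greedy loop = interval minimum of pvF ----
lemma pvGreedy_eq (hs : List Int) (c : Int → Int) (P Q : Int)
    (hpos : ∀ t ∈ hs, 0 < c t) (hsort : hs.Pairwise (· ≤ ·)) (hPQ : 0 ≤ P ∨ 0 ≤ Q) :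
    ∀ (fuel i j : Nat) (money : Int), i ≤ j → j < hs.length → j - i ≤ fuel →
      pvGreedy hs c P Q fuel i j money =
        money - P * pvGL hs c i - Q * pvGR hs c j + pvRmin (pvF hs c P Q) i j := by
  intro fuel
  induction fuel with
  | zero =>
    intro i j money h1 h2 h3
    have hij : i = j := by omega
    subst hij
    rw [pvGreedy, pvRmin_self]
    unfold pvF; ring
  | succ fuel ih =>
    intro i j money h1 h2 h3
    by_cases hij : i = j
    · subst hij
      rw [pvGreedy, if_pos rfl, pvRmin_self]
      unfold pvF; ring
    · have hij' : i < j := by omega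
      rw [pvGreedy, if_neg hij]
      by_cases hcond : P * pvPref hs c i < Q * pvSuf hs c j
      · rw [if_pos hcond]
        have hkey : P * pvPref hs c i ≤ Q * pvSuf hs c (i + 1) := by
          rcases le_or_gt 0 Q with hQ | hQ
          · have h4 : pvSuf hs c j ≤ pvSuf hs c (i + 1) := pvSuf_anti hs c hpos (i + 1) j (by omega)
            have h5 := mul_le_mul_of_nonneg_left h4 hQ
            omega
          · have hP : 0 ≤ P := hPQ.resolve_right (by omega)
            have h5 : 0 < pvPref hs c i := pvPref_pos hs c hpos i (by omega)
            have h6 : 0 < pvSuf hs c j := pvSuf_pos hs c hpos j h2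
            nlinarith
        have hgap : 0 ≤ pvG hs (i + 1) - pvG hs i := pvGap_nonneg hs hsort i (by omega)
        have hstep : pvF hs c P Q (i + 1) ≤ pvF hs c P Q i := by
          unfold pvF
          rw [pvGL_succ hs c i, pvGR_succ hs c i (by omega)]
          nlinarith [hkey, hgap]
        rw [ih (i + 1) j _ (by omega) h2 (by omega), pvGL_succ hs c i,
          ← pvRmin_drop_left (pvF hs c P Q) i j hij' hstep]
        ring
      · rw [if_neg hcond]
        obtain ⟨j', rfl⟩ : ∃ j', j = j' + 1 := ⟨j - 1, by omega⟩
        have hj' : j' < hs.length := by omega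
        have hkey : Q * pvSuf hs c (j' + 1) ≤ P * pvPref hs c j' := by
          rcases le_or_gt 0 P with hP | hP
          · have h4 : pvPref hs c i ≤ pvPref hs c j' := pvPref_mono hs c hpos i j' (by omega)
            have h5 := mul_le_mul_of_nonneg_left h4 hP
            omega
          · have hQ : 0 ≤ Q := hPQ.resolve_left (by omega)
            have h5 : 0 < pvPref hs c i := pvPref_pos hs c hpos i (by omega)
            have h6 : 0 < pvSuf hs c (j' + 1) := pvSuf_pos hs c hpos (j' + 1) h2
            nlinarith
        have hgap : 0 ≤ pvG hs (j' + 1) - pvG hs j' := pvGap_nonneg hs hsort j' h2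
        have hstep : pvF hs c P Q (j' + 1 - 1) ≤ pvF hs c P Q (j' + 1) := by
          simp only [Nat.add_sub_cancel]
          unfold pvF
          rw [pvGL_succ hs c j', pvGR_succ hs c j' (by omega)]
          nlinarith [hkey, hgap]
        have hrec := pvRmin_drop_right (pvF hs c P Q) i (j' + 1) (by omega) hstep
        simp only [Nat.add_sub_cancel] at hrec
        rw [show j' + 1 - 1 = j' from rfl]
        rw [ih i j' _ (by omega) hj' (by omega), pvGR_succ hs c j' (by omega), ← hrec]
        ring

-- ---- A's while loop with the mutated dict = the pure greedy loop ----
lemma pvGNe (hs : List Int) (hnd : hs.Nodup) (a b : Nat) (ha : a < hs.length)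
    (hb : b < hs.length) (hne : a ≠ b) : pvG hs a ≠ pvG hs b := by
  rw [pvG_eq hs a ha, pvG_eq hs b hb]
  intro he
  exact hne (List.Nodup.getElem_inj_iff hnd |>.mp he)

lemma pvLoopA_eq_greedy (hs : List Int) (c : Int → Int) (P Q : Int) (hnd : hs.Nodup) :
    ∀ (fuel i j : Nat) (d : PySem.Dict Int Int) (money : Int), i ≤ j → j < hs.length →
      (i < j → d.getD (pvG hs i) 0 = pvPref hs c i) →
      (i < j → d.getD (pvG hs j) 0 = pvSuf hs c j) →
      (∀ k, i < k → k < j → d.getD (pvG hs k) 0 = c (pvG hs k)) →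
      pvLoopA hs P Q fuel d (i : Int) (j : Int) money = pvGreedy hs c P Q fuel i j money := by
  intro fuel
  induction fuel with
  | zero => intro i j d money _ _ _ _ _; rfl
  | succ fuel ih =>
    intro i j d money h1 h2 hv1 hv2 hv3
    rw [pvLoopA, pvGreedy]
    by_cases hij : i = j
    · rw [if_pos (by exact_mod_cast congrArg (Nat.cast : Nat → Int) hij), if_pos hij]
    · have hij' : i < j := by omega
      rw [if_neg (by exact_mod_cast hij), if_neg hij]
      have hgi : PySem.List.pyGetD hs (i : Int) 0 = pvG hs i := PySem.List.pyGetD_natCast hs i 0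
      have hgj : PySem.List.pyGetD hs (j : Int) 0 = pvG hs j := PySem.List.pyGetD_natCast hs j 0
      have hgi1 : PySem.List.pyGetD hs ((i : Int) + 1) 0 = pvG hs (i + 1) := by
        rw [show ((i : Int) + 1) = ((i + 1 : Nat) : Int) by push_cast; ring]
        exact PySem.List.pyGetD_natCast hs (i + 1) 0
      have hgj1 : PySem.List.pyGetD hs ((j : Int) - 1) 0 = pvG hs (j - 1) := by
        rw [show ((j : Int) - 1) = ((j - 1 : Nat) : Int) by omega]
        exact PySem.List.pyGetD_natCast hs (j - 1) 0
      simp only [hgi, hgj, hgi1, hgj1, hv1 hij', hv2 hij']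
      by_cases hcond : P * pvPref hs c i < Q * pvSuf hs c j
      · rw [if_pos hcond, if_pos hcond]
        rw [show ((i : Int) + 1) = ((i + 1 : Nat) : Int) by push_cast; ring]
        apply ih (i + 1) j _ _ (by omega) h2
        · -- value at new minidx
          intro hlt
          rw [PySem.Dict.getD_insert_self]
          rw [hv3 (i + 1) (by omega) hlt]
          unfold pvPref
          rw [pvCntB_succ hs c (i + 1) (by omega)]
          unfold pvPref at hv1
          omega
        · intro hlt
          rw [PySem.Dict.getD_insert_of_ne _ _ _ (pvGNe hs hnd j (i + 1) h2 (by omega) (by omega))]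
          exact hv2 hij'
        · intro k hk1 hk2
          rw [PySem.Dict.getD_insert_of_ne _ _ _ (pvGNe hs hnd k (i + 1) (by omega) (by omega) (by omega))]
          exact hv3 k (by omega) hk2
      · rw [if_neg hcond, if_neg hcond]
        rw [show ((j : Int) - 1) = ((j - 1 : Nat) : Int) by omega]
        apply ih i (j - 1) _ _ (by omega) (by omega)
        · intro hlt
          rw [PySem.Dict.getD_insert_of_ne _ _ _ (pvGNe hs hnd i (j - 1) (by omega) (by omega) (by omega))]
          exact hv1 hij'
        · intro hlt
          rw [PySem.Dict.getD_insert_self]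
          rw [hv3 (j - 1) (by omega) (by omega)]
          unfold pvSuf
          have := pvCntB_succ hs c (j - 1) (by omega)
          rw [show (j - 1) + 1 = j from by omega] at this
          omega
        · intro k hk1 hk2
          rw [PySem.Dict.getD_insert_of_ne _ _ _ (pvGNe hs hnd k (j - 1) (by omega) (by omega) (by omega))]
          exact hv3 k hk1 (by omega)

-- ---- B's scan ----
lemma pvOptMin_some (a x : Int) : pvOptMin (some a) x = some (min a x) := by
  show (if x < a then some x else some a) = some (min a x)
  rcases lt_or_ge x a with h | h
  · rw [if_pos h]; congr 1; omega
  · rw [if_neg (not_lt.mpr h)]; congr 1; omega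

lemma pvFoldMin (f : Nat → Int) :
    ∀ (m i : Nat) (a : Int), (List.range' i m).foldl (fun x k => min x (f k)) a =
      if m = 0 then a else min a (pvRmin f i (i + m - 1)) := by
  intro m
  induction m with
  | zero => intro i a; simp
  | succ m ih =>
    intro i a
    rw [List.range'_succ, List.foldl_cons, ih (i + 1) (min a (f i))]
    by_cases hm : m = 0
    · subst hm; simp [pvRmin_self]
    · rw [if_neg hm, if_neg (Nat.succ_ne_zero m)]
      rw [show i + 1 + m - 1 = i + m from by omega, show i + (m + 1) - 1 = i + m from by omega]
      rw [min_assoc, ← pvRmin_rec_left f i (i + m) (by omega)]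

lemma pvFoldOpt (f : Nat → Int) :
    ∀ (m i : Nat) (a : Int), (List.range' i m).foldl (fun ob k => pvOptMin ob (f k)) (some a) =
      some ((List.range' i m).foldl (fun x k => min x (f k)) a) := by
  intro m
  induction m with
  | zero => intro i a; simp
  | succ m ih =>
    intro i a
    rw [List.range'_succ, List.foldl_cons, List.foldl_cons, pvOptMin_some, ih]

lemma pvScanMin (f : Nat → Int) (n : Nat) (hn : 1 ≤ n) :
    (List.range' 0 n).foldl (fun ob k => pvOptMin ob (f k)) none = some (pvRmin f 0 (n - 1)) := by
  obtain ⟨m, rfl⟩ : ∃ m, n = m + 1 := ⟨n - 1, by omega⟩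
  rw [List.range'_succ, List.foldl_cons, Nat.add_sub_cancel]
  show (List.range' 1 m).foldl (fun ob k => pvOptMin ob (f k)) (some (f 0)) = _
  rw [pvFoldOpt, pvFoldMin]
  by_cases h : m = 0
  · rw [if_pos h, h, pvRmin_self]
  · rw [if_neg h, show 1 + m - 1 = m from by omega, ← pvRmin_rec_left f 0 m (by omega)]

lemma pvFoldB (cd : PySem.Dict Int Int) (hs : List Int) (P Q : Int) :
    ∀ (l : List Int) (i : Nat) (b : Option Int), hs.drop i = l →
      (l.foldl (fun (s : Option Int × Int × Int) t =>
          (pvOptMin s.1 (P * (s.2.1 * t - s.2.2) +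
             Q * ((pvSumB hs (fun u => cd.getD u 0) hs.length - s.2.2 - cd.getD t 0 * t) -
                  (pvCntB hs (fun u => cd.getD u 0) hs.length - s.2.1 - cd.getD t 0) * t)),
           s.2.1 + cd.getD t 0, s.2.2 + cd.getD t 0 * t))
        (b, pvCntB hs (fun u => cd.getD u 0) i, pvSumB hs (fun u => cd.getD u 0) i)) =
      ((List.range' i l.length).foldl
          (fun ob k => pvOptMin ob (pvCost hs (fun u => cd.getD u 0) P Q k)) b,
       pvCntB hs (fun u => cd.getD u 0) hs.length, pvSumB hs (fun u => cd.getD u 0) hs.length) := by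
  intro l
  induction l with
  | nil =>
    intro i b hdrop
    have hlen : hs.length ≤ i := by
      have := congrArg List.length hdrop
      simp at this
      omega
    simp [pvCntB_stable hs _ i hlen, pvSumB_stable hs _ i hlen]
  | cons t l' ihl =>
    intro i b hdrop
    have hi : i < hs.length := by
      by_contra hcon
      rw [List.drop_eq_nil_of_le (by omega)] at hdrop
      simp at hdrop
    have ht : t = pvG hs i := by
      have := List.drop_eq_getElem_cons hi
      rw [hdrop] at this
      rw [pvG_eq hs i hi]
      exact (List.cons.injEq _ _ _ _ ▸ this).1
    have hdrop' : hs.drop (i + 1) = l' := by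
      have := List.drop_eq_getElem_cons hi
      rw [hdrop] at this
      exact ((List.cons.injEq _ _ _ _ ▸ this).2).symm
    rw [List.foldl_cons]
    have hcnt : pvCntB hs (fun u => cd.getD u 0) i + cd.getD t 0 =
        pvCntB hs (fun u => cd.getD u 0) (i + 1) := by
      rw [pvCntB_succ hs _ i hi, ht]
    have hsum : pvSumB hs (fun u => cd.getD u 0) i + cd.getD t 0 * t =
        pvSumB hs (fun u => cd.getD u 0) (i + 1) := by
      rw [pvSumB_succ hs _ i hi, ht]
    have hcost : (P * (pvCntB hs (fun u => cd.getD u 0) i * t - pvSumB hs (fun u => cd.getD u 0) i) +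
          Q * ((pvSumB hs (fun u => cd.getD u 0) hs.length - pvSumB hs (fun u => cd.getD u 0) i - cd.getD t 0 * t) -
               (pvCntB hs (fun u => cd.getD u 0) hs.length - pvCntB hs (fun u => cd.getD u 0) i - cd.getD t 0) * t)) =
        pvCost hs (fun u => cd.getD u 0) P Q i := by
      rw [pvCost, ht]
    simp only []
    rw [hcnt, hsum, hcost, ihl (i + 1) _ hdrop']
    have hlen : l'.length = hs.length - (i + 1) := by
      have := congrArg List.length hdrop'
      simpa using this.symm
    have hlen2 : (t :: l').length = hs.length - i := by
      have := congrArg List.length hdrop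
      simpa using this.symm
    rw [show (t :: l').length = l'.length + 1 from rfl, List.range'_succ, List.foldl_cons]

-- ---- the two counting loops build the same counter ----
lemma pvFoldlFlatMap {α β : Type} (l : List α) (g : α → List β)
    (f : PySem.Dict Int Int → β → PySem.Dict Int Int) (d : PySem.Dict Int Int) :
    (l.flatMap g).foldl f d = l.foldl (fun acc x => (g x).foldl f acc) d := by
  induction l generalizing d with
  | nil => rfl
  | cons x xs ih => rw [List.flatMap_cons, List.foldl_append, List.foldl_cons, ih]

lemma pvBuildB_eq (land : List (List Int)) :
    pvBuildB land = PySem.Dict.counter (pvVals land) := by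
  rw [← PySem.Dict.foldl_insert_getD_add_one_eq_counter]
  unfold pvVals
  rw [pvFoldlFlatMap]
  unfold pvBuildB
  apply PySem.List.foldl_congr_mem
  intro acc i _
  rw [List.foldl_map]

lemma pvBuildA_eq (land : List (List Int)) : pvBuildA land = pvBuildB land := by
  unfold pvBuildA pvBuildB
  apply PySem.List.foldl_congr_mem
  intro acc i _
  apply PySem.List.foldl_congr_mem
  intro d j _
  show (if d.contains (PySem.List.pyGetD (PySem.List.pyGetD land i []) j 0)
      then d.insert (PySem.List.pyGetD (PySem.List.pyGetD land i []) j 0)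
        (d.getD (PySem.List.pyGetD (PySem.List.pyGetD land i []) j 0) 0 + 1)
      else d.insert (PySem.List.pyGetD (PySem.List.pyGetD land i []) j 0) 1) =
    d.insert (PySem.List.pyGetD (PySem.List.pyGetD land i []) j 0)
      (d.getD (PySem.List.pyGetD (PySem.List.pyGetD land i []) j 0) 0 + 1)
  by_cases hc : d.contains (PySem.List.pyGetD (PySem.List.pyGetD land i []) j 0)
  · rw [if_pos hc]
  · rw [if_neg hc, PySem.Dict.getD_of_not_contains d 0 (by simpa using hc)]
    norm_num

lemma pvVals_ne_nil (land : List (List Int)) (hne : land ≠ []) : pvVals land ≠ [] := by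
  unfold pvVals
  have hlen : 0 < land.length := List.length_pos_of_ne_nil hne
  have hmem : (0 : Int) ∈ PySem.List.pyRange 0 (land.length : Int) 1 := by
    rw [PySem.List.mem_pyRange_one]
    constructor
    · omega
    · exact_mod_cast hlen
  apply List.ne_nil_of_mem (a := PySem.List.pyGetD (PySem.List.pyGetD land 0 []) 0 0)
  rw [List.mem_flatMap]
  exact ⟨0, hmem, List.mem_map.mpr ⟨0, hmem, rfl⟩⟩

-- ---- assembling both sides ----
def pvHS (land : List (List Int)) : List Int :=
  PySem.List.sorted (pvBuildB land).keys (fun x => x) false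
def pvCF (land : List (List Int)) : Int → Int := fun u => (pvBuildB land).getD u 0

lemma pvTots (cd : PySem.Dict Int Int) (hs : List Int) :
    hs.foldl (fun (s : Int × Int) t => (s.1 + cd.getD t 0, s.2 + cd.getD t 0 * t)) (0, 0) =
      (pvCntB hs (fun u => cd.getD u 0) hs.length, pvSumB hs (fun u => cd.getD u 0) hs.length) := by
  rw [PySem.List.foldl_prod_mk (f := fun (a : Int) (t : Int) => a + cd.getD t 0)
    (g := fun (a : Int) (t : Int) => a + cd.getD t 0 * t)]
  rw [PySem.List.foldl_add, PySem.List.foldl_add]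
  simp [pvCntB, pvSumB, List.take_length]

lemma pvFacts (land : List (List Int)) (hne : land ≠ []) :
    (pvHS land).Nodup ∧ (pvHS land).Pairwise (· ≤ ·) ∧
      (∀ t ∈ pvHS land, 0 < pvCF land t) ∧ 1 ≤ (pvHS land).length := by
  have hkeys : (pvBuildB land).keys = PySem.Set.ofList (pvVals land) := by
    rw [pvBuildB_eq]; exact PySem.Dict.keys_counter (pvVals land)
  have hknd : (pvBuildB land).keys.Nodup := by
    rw [pvBuildB_eq]; exact PySem.Dict.nodup_keys_counter (pvVals land)
  refine ⟨?_, ?_, ?_, ?_⟩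
  · exact ((PySem.List.sorted_perm (pvBuildB land).keys (fun x => x) false).nodup_iff).mpr hknd
  · have := PySem.List.sorted_pairwise (pvBuildB land).keys (key := fun x => x)
    simpa [pvHS] using this
  · intro t ht
    have hmem : t ∈ (pvBuildB land).keys :=
      (PySem.List.mem_sorted (pvBuildB land).keys (fun x => x) false t).mp ht
    rw [hkeys] at hmem
    have hv : t ∈ pvVals land := (PySem.Set.mem_ofList (pvVals land) t).mp hmem
    show 0 < (pvBuildB land).getD t 0
    rw [pvBuildB_eq, PySem.Dict.getD_counter]
    exact_mod_cast List.count_pos_iff.mpr hv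
  · have hv := pvVals_ne_nil land hne
    have hk : (pvBuildB land).keys ≠ [] := by
      rw [hkeys]
      rcases List.exists_mem_of_ne_nil _ hv with ⟨x, hx⟩
      exact List.ne_nil_of_mem ((PySem.Set.mem_ofList (pvVals land) x).mpr hx)
    have : pvHS land ≠ [] := by
      unfold pvHS
      rw [Ne, PySem.List.sorted_eq_nil_iff]
      exact hk
    have := List.length_pos_of_ne_nil this
    omega

lemma pvSolutionA (land : List (List Int)) (P Q : Int) (hne : land ≠ [])
    (hPQ : 0 ≤ P ∨ 0 ≤ Q) :
    solution land P Q =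
      pvRmin (pvCost (pvHS land) (pvCF land) P Q) 0 ((pvHS land).length - 1) := by
  obtain ⟨hnd, hsort, hpos, hlen⟩ := pvFacts land hne
  have hcf : pvCF land = fun u => (pvBuildB land).getD u 0 := rfl
  rw [hcf] at hpos
  simp only [solution, pvBuildA_eq]
  have inv1 : (0 : Nat) < (pvHS land).length - 1 →
      (pvBuildB land).getD (pvG (pvHS land) 0) 0 = pvPref (pvHS land) (fun u => (pvBuildB land).getD u 0) 0 := by
    intro _
    unfold pvPref
    rw [pvCntB_succ (pvHS land) _ 0 (by omega), pvCntB_zero]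
    show (pvBuildB land).getD (pvG (pvHS land) 0) 0 = 0 + (pvBuildB land).getD (pvG (pvHS land) 0) 0
    omega
  have inv2 : (0 : Nat) < (pvHS land).length - 1 →
      (pvBuildB land).getD (pvG (pvHS land) ((pvHS land).length - 1)) 0 =
        pvSuf (pvHS land) (fun u => (pvBuildB land).getD u 0) ((pvHS land).length - 1) := by
    intro _
    unfold pvSuf
    have h := pvCntB_succ (pvHS land) (fun u => (pvBuildB land).getD u 0) ((pvHS land).length - 1) (by omega)
    rw [show (pvHS land).length - 1 + 1 = (pvHS land).length from by omega] at h
    simp only [] at h ⊢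
    omega
  have inv3 : ∀ k, (0 : Nat) < k → k < (pvHS land).length - 1 →
      (pvBuildB land).getD (pvG (pvHS land) k) 0 = (fun u => (pvBuildB land).getD u 0) (pvG (pvHS land) k) := by
    intro k _ _; rfl
  have key := pvLoopA_eq_greedy (pvHS land) (fun u => (pvBuildB land).getD u 0) P Q hnd
    ((pvHS land).length - 1) 0 ((pvHS land).length - 1) (pvBuildB land) 0
    (by omega) (by omega) inv1 inv2 inv3
  rw [Nat.cast_sub hlen, Nat.cast_zero, Nat.cast_one] at key
  show pvLoopA (pvHS land) P Q ((((pvHS land).length : Int) - 1 - 0).toNat) (pvBuildB land) 0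
    (((pvHS land).length : Int) - 1) 0 = _
  rw [show (((pvHS land).length : Int) - 1 - 0).toNat = (pvHS land).length - 1 from by omega]
  rw [key]
  rw [pvGreedy_eq (pvHS land) (fun u => (pvBuildB land).getD u 0) P Q hpos hsort hPQ
    ((pvHS land).length - 1) 0 ((pvHS land).length - 1) 0 (by omega) (by omega) (by omega)]
  rw [show pvGL (pvHS land) (fun u => (pvBuildB land).getD u 0) 0 = 0 from by simp [pvGL],
    pvGR_last (pvHS land) _ ((pvHS land).length - 1) (le_refl _)]
  rw [pvRmin_congr (pvF (pvHS land) (fun u => (pvBuildB land).getD u 0) P Q)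
    (pvCost (pvHS land) (fun u => (pvBuildB land).getD u 0) P Q) 0 ((pvHS land).length - 1)
    (by omega) (fun k h1 h2 => pvF_eq_cost (pvHS land) _ P Q k (by omega))]
  rw [hcf]
  ring

lemma pvSolutionB (land : List (List Int)) (P Q : Int) (hne : land ≠ []) :
    solution_alt land P Q =
      pvRmin (pvCost (pvHS land) (pvCF land) P Q) 0 ((pvHS land).length - 1) := by
  obtain ⟨hnd, hsort, hpos, hlen⟩ := pvFacts land hne
  have h1 : solution_alt land P Q =
      (match ((pvHS land).foldl (fun (s : Option Int × Int × Int) t =>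
          (pvOptMin s.1 (P * (s.2.1 * t - s.2.2) +
             Q * ((pvSumB (pvHS land) (fun u => (pvBuildB land).getD u 0) (pvHS land).length - s.2.2 - (pvBuildB land).getD t 0 * t) -
                  (pvCntB (pvHS land) (fun u => (pvBuildB land).getD u 0) (pvHS land).length - s.2.1 - (pvBuildB land).getD t 0) * t)),
           s.2.1 + (pvBuildB land).getD t 0, s.2.2 + (pvBuildB land).getD t 0 * t))
        (none, pvCntB (pvHS land) (fun u => (pvBuildB land).getD u 0) 0,
         pvSumB (pvHS land) (fun u => (pvBuildB land).getD u 0) 0)).1 with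
       | some b => b
       | none => 0) := by
    simp only [solution_alt]
    simp only [pvTots (pvBuildB land) (PySem.List.sorted (pvBuildB land).keys (fun x => x) false)]
    rfl
  rw [h1, pvFoldB (pvBuildB land) (pvHS land) P Q (pvHS land) 0 none (by simp)]
  rw [pvScanMin (pvCost (pvHS land) (fun u => (pvBuildB land).getD u 0) P Q) (pvHS land).length hlen]
  rfl

-- ===== VERDICT (by name: the statement is the Claim_ definition above) =====
theorem solution_spec : Claim_equal_solution := by
  unfold Claim_equal_solution
  intro land P Q hdom hpre
  unfold Spec_solution
  obtain ⟨hne, hrows, hPQ⟩ := hpre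
  rw [pvSolutionA land P Q hne hPQ, pvSolutionB land P Q hne]
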